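-- pv_equiv track=rewrite | github.com/yasufum/spp-tmp | src/cli/commands/pri_flow.py | _parse_flow_rule_actions
-- ===== SOURCE A (Python) =====
-- def _parse_flow_rule_actions(params, index, flow_rule):
--     """Parse actions of flow rule and convert to dict type.
--
--     Returns the index where "end" is specified
--     and the action part is completed.
--     It is abnormal that index exceeds "len(params)"
--     because "end" is not specified.
--     """
--     sentensce = ""
--     flow_rule["actions"] = []
--
--     if params[index] != "actions":
--         return None
--
--     index += 1
--
--     while index < len(params):
--         if params[index] == "/":
--             flow_rule["actions"].append(sentensce.rstrip())
--             sentensce = ""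
--
--         elif params[index] == "end":
--             index += 1
--             break
--
--         else:
--             sentensce += params[index] + " "
--
--         index += 1
--
--     return index
-- ===== SOURCE B (Python) =====
-- def _parse_flow_rule_actions(params, index, flow_rule):
--     """Parse actions of flow rule and convert to dict type.
--
--     Different decomposition: locate the first "end" in the tail slice once,
--     then derive the returned index arithmetically; the groups between "/"
--     separators are rebuilt by splitting the slice (the group after the last
--     "/" is never flushed, hence groups[:-1]).
--     Equivalence with the original is about the RETURN value; the in-place
--     update of flow_rule["actions"] is reproduced as well.
--     """
--     flow_rule["actions"] = []
--
--     if params[index] != "actions":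
--         return None
--
--     tail = params[index + 1:]
--     try:
--         k = tail.index("end")
--     except ValueError:
--         k = None
--
--     sub = tail if k is None else tail[:k]
--     groups = [[]]
--     for tok in sub:
--         if tok == "/":
--             groups.append([])
--         else:
--             groups[-1].append(tok)
--     flow_rule["actions"] = ["".join(t + " " for t in g).rstrip()
--                             for g in groups[:-1]]
--
--     return len(params) if k is None else index + 2 + k
-- ===== Notes on version B (the rewrite author's own statement) =====
-- stated objective: simpler
-- what changed: A's token-by-token state-machine loop (accumulating a sentence string and stepping an index until 'end') is replaced by one search for the first 'end' in the tail slice params[index+1:] plus index arithmetic for the return value, with the actions groups rebuilt by splitting that slice on '/'.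
-- intended difference: On an in-range index <= -2 with params[index] == 'actions' where 'end' occurs in params but not in the tail slice, A's loop wraps past the list start and re-scans the whole list (negative-index wraparound), returning the position after that earlier 'end', while B scans only params[index+1:] and returns len(params); B's single-pass value is the intended one since the wrapped second pass is an artefact of A's raw index arithmetic. — e.g. on _parse_flow_rule_actions(["end", "actions", "x"], -2, []): A returns some 1, B returns some 3
import Mathlib
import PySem

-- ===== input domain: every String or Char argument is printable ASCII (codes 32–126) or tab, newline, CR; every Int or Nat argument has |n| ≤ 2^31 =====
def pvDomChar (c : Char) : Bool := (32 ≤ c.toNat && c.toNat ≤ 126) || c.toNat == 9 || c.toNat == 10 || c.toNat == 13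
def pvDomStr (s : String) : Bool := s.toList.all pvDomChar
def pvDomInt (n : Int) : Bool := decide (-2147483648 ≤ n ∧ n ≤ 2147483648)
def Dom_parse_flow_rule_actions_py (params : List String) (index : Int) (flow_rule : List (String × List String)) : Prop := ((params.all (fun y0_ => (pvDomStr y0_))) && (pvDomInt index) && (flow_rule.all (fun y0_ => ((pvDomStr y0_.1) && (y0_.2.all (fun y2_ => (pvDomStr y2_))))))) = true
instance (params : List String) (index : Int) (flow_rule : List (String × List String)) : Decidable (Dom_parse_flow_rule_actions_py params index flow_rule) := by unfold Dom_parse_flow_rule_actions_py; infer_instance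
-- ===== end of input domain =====

-- B replaces A's token-by-token scanning loop by one search for the first "end" in the
-- tail slice plus index arithmetic (objective: simpler decomposition). Both versions
-- mutate flow_rule["actions"] in place; the equivalence proved here is about the RETURN
-- value only (B reproduces A's mutation for non-negative indices).

-- ===== PORT A =====
-- A's while loop: state = (index, sentensce, actions accumulator); fuel counts the
-- remaining iterations while index < len(params).  The actions accumulator mirrors the
-- flow_rule["actions"] mutation; it never influences the returned index.
def pvALoop (params : List String) : Nat → Int → String → List String → Int
  | 0, index, _sent, _acts => index
  | n+1, index, sent, acts =>
    match PySem.List.pyGet? params index with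
    | none => index   -- unreachable: fuel keeps index < len(params) and index only grows
    | some t =>
      if t = "/" then pvALoop params n (index + 1) "" (acts ++ [PySem.Str.rstrip sent])
      else if t = "end" then index + 1
      else pvALoop params n (index + 1) (sent ++ t ++ " ") acts

def parse_flow_rule_actions_py (params : List String) (index : Int) (flow_rule : List (String × List String)) : Option Int :=
  -- sentensce = ""; flow_rule["actions"] = []  (mutation: not part of the returned value)
  match PySem.List.pyGet? params index with
  | none => none      -- params[index]: IndexError, excluded by Pre_
  | some t =>
    if t ≠ "actions" then none
    else some (pvALoop params ((params.length : Int) - (index + 1)).toNat (index + 1) "" [])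

-- ===== PORT B =====
-- B: slice the tail once, find the first "end" in it, return by arithmetic.
-- (Source B additionally rebuilds flow_rule["actions"] from the slice; that in-place
-- mutation cannot appear in the Option Int return and is not ported.)
def parse_flow_rule_actions_py_alt (params : List String) (index : Int) (flow_rule : List (String × List String)) : Option Int :=
  match PySem.List.pyGet? params index with
  | none => none      -- params[index]: IndexError, excluded by Pre_
  | some t =>
    if t ≠ "actions" then none
    else
      let tail := PySem.List.slice params (some (index + 1)) none
      match PySem.List.index? tail "end" with
      | some k => some (index + 2 + (k : Int))
      | none => some (params.length : Int)

-- ===== PRECONDITION & SPEC =====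
-- A raises IndexError exactly when index is out of range for params; nothing else raises.
def Pre_parse_flow_rule_actions_py (params : List String) (index : Int) (flow_rule : List (String × List String)) : Prop :=
  PySem.Raise.InRange params.length index
instance (params : List String) (index : Int) (flow_rule : List (String × List String)) : Decidable (Pre_parse_flow_rule_actions_py params index flow_rule) := by unfold Pre_parse_flow_rule_actions_py; infer_instance

def pvWitness_parse_flow_rule_actions_py : List String × Int × (List (String × List String)) :=
  (["actions", "a", "b", "/", "end", "x"], 0, [])

-- On index ≤ -2 in range with params[index] == "actions" where "end" occurs in params but
-- only before the tail slice, A's loop walks off the negative positions past the list start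
-- and re-scans the whole list (negative-index wraparound), returning the position after that
-- earlier "end", while B scans only the tail params[index+1:] and returns len(params);
-- B's single-pass value is the intended one — the wrapped second pass is an artefact.
def D_parse_flow_rule_actions_py (params : List String) (index : Int) (flow_rule : List (String × List String)) : Prop :=
  index ≤ -2 ∧ 0 ≤ index + params.length ∧
  PySem.List.pyGet? params index = some "actions" ∧
  "end" ∉ params.drop (index + 1 + params.length).toNat ∧
  "end" ∈ params
instance (params : List String) (index : Int) (flow_rule : List (String × List String)) : Decidable (D_parse_flow_rule_actions_py params index flow_rule) := by unfold D_parse_flow_rule_actions_py; infer_instance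

def Spec_parse_flow_rule_actions_py (params : List String) (index : Int) (flow_rule : List (String × List String)) (out : Option Int) : Prop := ¬ D_parse_flow_rule_actions_py params index flow_rule → out = parse_flow_rule_actions_py_alt params index flow_rule
instance (params : List String) (index : Int) (flow_rule : List (String × List String)) (out : Option Int) : Decidable (Spec_parse_flow_rule_actions_py params index flow_rule out) := by unfold Spec_parse_flow_rule_actions_py; infer_instance

def pvDiffWitness_parse_flow_rule_actions_py : List String × Int × (List (String × List String)) :=
  (["end", "actions", "x"], -2, [])
def pvDiffWitnessOut_parse_flow_rule_actions_py : (Option Int) × (Option Int) := (some 1, some 3)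

-- ===== CLAIM (what is proved, stated in full; the proofs are below) =====
def Claim_unchanged_parse_flow_rule_actions_py : Prop := ∀ (params : List String) (index : Int) (flow_rule : List (String × List String)), Dom_parse_flow_rule_actions_py params index flow_rule → Pre_parse_flow_rule_actions_py params index flow_rule → Spec_parse_flow_rule_actions_py params index flow_rule (parse_flow_rule_actions_py params index flow_rule)
def Claim_changed_parse_flow_rule_actions_py : Prop := Dom_parse_flow_rule_actions_py (pvDiffWitness_parse_flow_rule_actions_py.1) (pvDiffWitness_parse_flow_rule_actions_py.2.1) (pvDiffWitness_parse_flow_rule_actions_py.2.2) ∧ Pre_parse_flow_rule_actions_py (pvDiffWitness_parse_flow_rule_actions_py.1) (pvDiffWitness_parse_flow_rule_actions_py.2.1) (pvDiffWitness_parse_flow_rule_actions_py.2.2) ∧ D_parse_flow_rule_actions_py (pvDiffWitness_parse_flow_rule_actions_py.1) (pvDiffWitness_parse_flow_rule_actions_py.2.1) (pvDiffWitness_parse_flow_rule_actions_py.2.2) ∧ parse_flow_rule_actions_py (pvDiffWitness_parse_flow_rule_actions_py.1) (pvDiffWitness_parse_flow_rule_actions_py.2.1) (pvDiffWitness_parse_flow_rule_actions_py.2.2)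 = pvDiffWitnessOut_parse_flow_rule_actions_py.1 ∧ parse_flow_rule_actions_py_alt (pvDiffWitness_parse_flow_rule_actions_py.1) (pvDiffWitness_parse_flow_rule_actions_py.2.1) (pvDiffWitness_parse_flow_rule_actions_py.2.2) = pvDiffWitnessOut_parse_flow_rule_actions_py.2 ∧ pvDiffWitnessOut_parse_flow_rule_actions_py.1 ≠ pvDiffWitnessOut_parse_flow_rule_actions_py.2
def Claim_exact_parse_flow_rule_actions_py : Prop := ∀ (params : List String) (index : Int) (flow_rule : List (String × List String)), Dom_parse_flow_rule_actions_py params index flow_rule → Pre_parse_flow_rule_actions_py params index flow_rule → D_parse_flow_rule_actions_py params index flow_rule → parse_flow_rule_actions_py params index flow_rule ≠ parse_flow_rule_actions_py_alt params index flow_rule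

-- ===== LEMMAS AND PROOFS =====

def pvSeq (params : List String) (start : Int) : List String :=
  if start < 0 then params.drop (start + params.length).toNat ++ params
  else params.drop start.toNat

lemma pvSeq_cons (params : List String) (start : Int)
    (h1 : -(params.length : Int) ≤ start) (h2 : start < params.length) :
    ∃ h rest, pvSeq params start = h :: rest ∧
      PySem.List.pyGet? params start = some h ∧ pvSeq params (start + 1) = rest := by
  by_cases hs : start < 0
  · have hj0 : 0 ≤ start + (params.length : Int) := by omega
    have hjl : (start + (params.length : Int)).toNat < params.length := by omega
    refine ⟨params[(start + (params.length : Int)).toNat],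
      params.drop ((start + (params.length : Int)).toNat + 1) ++ params, ?_, ?_, ?_⟩
    · simp only [pvSeq, if_pos hs]
      rw [List.drop_eq_getElem_cons hjl, List.cons_append]
    · simp only [PySem.List.pyGet?, PySem.List.pyIdx?]
      rw [if_neg (by omega), if_pos (by omega)]
      have : params.length - (-start).toNat = (start + (params.length : Int)).toNat := by omega
      rw [this]
      simp [List.getElem?_eq_getElem hjl]
    · by_cases hs1 : start + 1 < 0
      · simp only [pvSeq, if_pos hs1]
        have : (start + 1 + (params.length : Int)).toNat = (start + (params.length : Int)).toNat + 1 := by omega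
        rw [this]
      · have hlen : (start + (params.length : Int)).toNat + 1 = params.length := by omega
        simp only [pvSeq, if_neg hs1]
        rw [hlen, List.drop_length]
        have : (start + 1).toNat = 0 := by omega
        rw [this, List.drop_zero]
        simp
  · refine ⟨params[start.toNat], params.drop (start.toNat + 1), ?_, ?_, ?_⟩
    · simp only [pvSeq, if_neg hs]
      rw [List.drop_eq_getElem_cons (by omega)]
    · exact PySem.List.pyGet?_eq_some_getElem params (by omega) h2
    · simp only [pvSeq, if_neg (by omega : ¬ start + 1 < 0)]
      congr 1
      omega

lemma pvALoop_spec (params : List String) : ∀ (n : Nat) (start : Int) (sent : String) (acts : List String),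
    -(params.length : Int) ≤ start → start + n = params.length →
    pvALoop params n start sent acts =
      (match PySem.List.index? (pvSeq params start) "end" with
       | some k => start + (k : Int) + 1
       | none => (params.length : Int)) := by
  intro n
  induction n with
  | zero =>
    intro start sent acts h1 h2
    have hs : ¬ start < 0 := by omega
    have : start.toNat = params.length := by omega
    simp only [pvSeq, if_neg hs, this, List.drop_length, pvALoop]
    rw [PySem.List.index?_eq_idxOf?]
    simp
    omega
  | succ n ih =>
    intro start sent acts h1 h2
    obtain ⟨h, rest, hseq, hget, hnext⟩ := pvSeq_cons params start h1 (by omega)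
    rw [hseq]
    simp only [pvALoop, hget]
    by_cases hsl : h = "/"
    · rw [if_pos hsl, ih (start+1) _ _ (by omega) (by omega), hnext, hsl,
        PySem.List.index?_cons_of_ne _ (by decide)]
      cases PySem.List.index? rest "end" with
      | none => simp
      | some k => simp; ring
    · rw [if_neg hsl]
      by_cases hse : h = "end"
      · rw [if_pos hse, hse, PySem.List.index?_cons_self]
        simp
      · rw [if_neg hse, ih (start+1) _ _ (by omega) (by omega), hnext,
            PySem.List.index?_cons_of_ne _ hse]
        cases PySem.List.index? rest "end" with
        | none => simp
        | some k => simp; ring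

lemma pvTail_eq (params : List String) (index : Int)
    (h1 : -(params.length : Int) ≤ index) (h2 : index < params.length) :
    PySem.List.slice params (some (index + 1)) none =
      (if index + 1 < 0 then params.drop (index + 1 + params.length).toNat
       else params.drop (index + 1).toNat) := by
  rw [PySem.List.slice_some_none]
  by_cases hs : index + 1 < 0
  · rw [if_pos hs]
    simp only [PySem.List.clampIdx, if_pos hs]
    rw [if_neg (by omega)]
    congr 1
    omega
  · rw [if_neg hs]
    simp only [PySem.List.clampIdx, if_neg hs]
    congr 1
    omega

lemma pvIndex?_append_left_not_mem {α : Type} [DecidableEq α] (l t : List α) (v : α) (hv : v ∉ l) :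
    PySem.List.index? (l ++ t) v = (PySem.List.index? t v).map (· + l.length) := by
  induction l with
  | nil =>
    simp only [List.nil_append, List.length_nil]
    cases PySem.List.index? t v <;> simp
  | cons x l ihl =>
    have hx : x ≠ v := by intro h; exact hv (h ▸ List.mem_cons_self)
    rw [List.cons_append, PySem.List.index?_cons_of_ne _ hx,
      ihl (fun h => hv (List.mem_cons_of_mem _ h))]
    cases PySem.List.index? t v <;> simp
    omega

lemma pvMain_unchanged (params : List String) (index : Int) (flow_rule : List (String × List String))
    (hPre : PySem.Raise.InRange params.length index)
    (hnD : ¬ (index ≤ -2 ∧ 0 ≤ index + params.length ∧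
      PySem.List.pyGet? params index = some "actions" ∧
      "end" ∉ params.drop (index + 1 + params.length).toNat ∧
      "end" ∈ params)) :
    parse_flow_rule_actions_py params index flow_rule = parse_flow_rule_actions_py_alt params index flow_rule := by
  obtain ⟨hlo, hhi⟩ := hPre
  unfold parse_flow_rule_actions_py parse_flow_rule_actions_py_alt
  cases hget : PySem.List.pyGet? params index with
  | none => rfl
  | some t =>
    by_cases ht : t ≠ "actions"
    · simp only [if_pos ht]
    · simp only [if_neg ht]
      push_neg at ht
      subst ht
      rw [pvALoop_spec params _ (index+1) "" [] (by omega) (by omega),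
        pvTail_eq params index hlo hhi]
      by_cases hneg : index + 1 < 0
      · -- negative start: A scans drop j ++ params, B scans drop j
        rw [if_pos hneg]
        have hj := (index + 1 + (params.length : Int)).toNat
        have hseq : pvSeq params (index + 1) =
            params.drop (index + 1 + (params.length : Int)).toNat ++ params := by
          simp only [pvSeq, if_pos hneg]
        rw [hseq]
        rcases Decidable.em ("end" ∈ params.drop (index + 1 + (params.length : Int)).toNat) with hmem | hnmem
        · rw [PySem.List.index?_append_of_mem _ hmem]
          cases PySem.List.index? (params.drop (index + 1 + (params.length : Int)).toNat) "end" with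
          | none => rfl
          | some k => simp only [Option.some.injEq]; push_cast; ring
        · have hnp : "end" ∉ params := by
            intro hp
            exact hnD ⟨by omega, by omega, hget, hnmem, hp⟩
          have h1 : PySem.List.index? (params.drop (index + 1 + (params.length : Int)).toNat ++ params) "end" = none := by
            rw [PySem.List.index?_eq_none_iff]
            intro h
            rcases List.mem_append.mp h with h | h
            · exact hnmem h
            · exact hnp h
          have h2 : PySem.List.index? (params.drop (index + 1 + (params.length : Int)).toNat) "end" = none := by
            rw [PySem.List.index?_eq_none_iff]; exact hnmem
          rw [h1, h2]
      · rw [if_neg hneg]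
        have hseq : pvSeq params (index + 1) = params.drop (index + 1).toNat := by
          simp only [pvSeq, if_neg hneg]
        rw [hseq]
        cases PySem.List.index? (params.drop (index + 1).toNat) "end" with
        | none => rfl
        | some k => simp only [Option.some.injEq]; push_cast; ring

lemma pvMain_tight (params : List String) (index : Int) (flow_rule : List (String × List String))
    (hPre : PySem.Raise.InRange params.length index)
    (hD : index ≤ -2 ∧ 0 ≤ index + params.length ∧
      PySem.List.pyGet? params index = some "actions" ∧
      "end" ∉ params.drop (index + 1 + params.length).toNat ∧
      "end" ∈ params) :
    parse_flow_rule_actions_py params index flow_rule ≠ parse_flow_rule_actions_py_alt params index flow_rule := by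
  obtain ⟨hlo, hhi⟩ := hPre
  obtain ⟨hi2, hil, hact, hnotail, hmem⟩ := hD
  unfold parse_flow_rule_actions_py parse_flow_rule_actions_py_alt
  rw [hact]
  show some (pvALoop params ((params.length : Int) - (index + 1)).toNat (index + 1) "" []) ≠
    (match PySem.List.index? (PySem.List.slice params (some (index + 1)) none) "end" with
     | some k => some (index + 2 + (k : Int))
     | none => some ((params.length : Int)))
  rw [pvALoop_spec params _ (index+1) "" [] (by omega) (by omega),
    pvTail_eq params index hlo hhi, if_pos (by omega)]
  have hseq : pvSeq params (index + 1) =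
      params.drop (index + 1 + (params.length : Int)).toNat ++ params := by
    simp only [pvSeq, if_pos (by omega : index + 1 < 0)]
  rw [hseq]
  -- index? over the append: "end" is not in the dropped tail, so it is found in params
  rw [pvIndex?_append_left_not_mem _ _ _ hnotail]
  have h2 : PySem.List.index? (params.drop (index + 1 + (params.length : Int)).toNat) "end" = none := by
    rw [PySem.List.index?_eq_none_iff]; exact hnotail
  rw [h2]
  cases hp : PySem.List.index? params "end" with
  | none => exact absurd ((PySem.List.index?_eq_none_iff _ _).mp hp) (by simpa using hmem)
  | some p =>
    obtain ⟨hpl, hpe, _⟩ := PySem.List.getElem_of_index?_eq_some hp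
    -- p < len - 1: position len-1 lies in the dropped tail, where "end" does not occur
    have hj : ((index + 1 + (params.length : Int)).toNat : Int) = index + 1 + params.length := by omega
    have hplt : p < (index + 1 + (params.length : Int)).toNat := by
      by_contra hge
      apply hnotail
      have : params[p] ∈ params.drop (index + 1 + (params.length : Int)).toNat := by
        rw [List.mem_drop_iff_getElem]
        exact ⟨p - (index + 1 + (params.length : Int)).toNat, by omega,
          by congr 1; omega⟩
      rwa [hpe] at this
    simp only [Option.map_some, Option.some.injEq, ne_eq]
    rw [List.length_drop]
    intro hcontra
    have hjle : (index + 1 + (params.length : Int)).toNat ≤ params.length := by omega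
    rw [Nat.cast_add, Nat.cast_sub hjle] at hcontra
    have hj2 : ((index + 1 + (params.length : Int)).toNat : Int) = index + 1 + params.length := by omega
    rw [hj2] at hcontra
    have hplt2 : (p : Int) < index + 1 + params.length := by omega
    linarith

-- ===== VERDICT (by name: the statement is the Claim_ definition above) =====
theorem parse_flow_rule_actions_py_spec : Claim_unchanged_parse_flow_rule_actions_py := by
  intro params index flow_rule _hDom hPre
  unfold Spec_parse_flow_rule_actions_py
  intro hnD
  unfold Pre_parse_flow_rule_actions_py at hPre
  unfold D_parse_flow_rule_actions_py at hnD
  exact pvMain_unchanged params index flow_rule hPre hnD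

theorem parse_flow_rule_actions_py_changed : Claim_changed_parse_flow_rule_actions_py := by
  unfold Claim_changed_parse_flow_rule_actions_py; decide

theorem parse_flow_rule_actions_py_tight : Claim_exact_parse_flow_rule_actions_py := by
  intro params index flow_rule _hDom hPre hD
  unfold Pre_parse_flow_rule_actions_py at hPre
  unfold D_parse_flow_rule_actions_py at hD
  exact pvMain_tight params index flow_rule hPre hD
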